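-- pv_equiv track=rewrite | github.com/white-prog/python-codes | football1.py | point_checker
-- ===== SOURCE A (Python) =====
-- def point_checker(s):
--     pnt = 0
--     for i in s:
--         if i == "W":
--             pnt += 3
--         elif i == "D":
--             pnt += 1
--     return pnt
-- ===== SOURCE B (Python) =====
-- POINTS = {"W": 3, "D": 1}
--
-- def point_checker(s):
--     # Divide and conquer: score of s[lo:hi] = score(left half) + score(right half),
--     # with a points-table lookup at single characters.
--     def go(lo, hi):
--         if hi - lo == 0:
--             return 0
--         if hi - lo == 1:
--             return POINTS.get(s[lo], 0)
--         mid = (lo + hi) // 2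
--         return go(lo, mid) + go(mid, hi)
--     return go(0, len(s))
-- ===== Notes on version B (the rewrite author's own statement) =====
-- stated objective: alternative
-- what changed: Replaces the single left-to-right branching accumulator loop with a divide-and-conquer recursion over index ranges that splits the string in half and scores single characters through a points table, exploiting associativity of addition.
import Mathlib
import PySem

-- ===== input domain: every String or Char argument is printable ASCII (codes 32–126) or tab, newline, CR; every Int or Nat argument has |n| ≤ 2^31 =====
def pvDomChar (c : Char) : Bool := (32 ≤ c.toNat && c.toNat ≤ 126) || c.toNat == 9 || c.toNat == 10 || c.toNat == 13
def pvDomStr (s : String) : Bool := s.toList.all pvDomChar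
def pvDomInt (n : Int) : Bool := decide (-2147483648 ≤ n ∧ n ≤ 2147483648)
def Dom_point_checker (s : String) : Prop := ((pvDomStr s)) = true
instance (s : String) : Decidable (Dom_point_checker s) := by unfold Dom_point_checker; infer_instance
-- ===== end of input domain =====

-- B replaces A's branching accumulator loop by a divide-and-conquer recursion over index
-- ranges with a points-table lookup at single characters (alternative decomposition, same cost).

-- ===== PORT A =====
def point_checker (s : String) : Int :=
  s.toList.foldl (fun pnt i =>
    if i == 'W' then pnt + 3
    else if i == 'D' then pnt + 1
    else pnt) 0

-- ===== PORT B =====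
-- POINTS = {"W": 3, "D": 1}  (a length-1 Python string slice is a Char under the convention)
def pcPoints : PySem.Dict Char Int := PySem.Dict.ofList [('W', 3), ('D', 1)]

-- go(lo, hi); lo, hi are always ≥ 0 in Source B, so Nat indices and Nat '/' match Python's '//' exactly.
def pcGo (s : String) (lo hi : Nat) : Int :=
  if hi - lo = 0 then 0
  else if hi - lo = 1 then
    match PySem.Str.pyGet? s (lo : Int) with   -- s[lo]; go keeps lo < len(s), so never none
    | some ch => pcPoints.getD ch 0
    | none => 0
  else pcGo s lo ((lo + hi) / 2) + pcGo s ((lo + hi) / 2) hi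
termination_by hi - lo
decreasing_by all_goals omega

def point_checker_alt (s : String) : Int := pcGo s 0 s.length

-- ===== PRECONDITION & SPEC =====
def Spec_point_checker (s : String) (out : Int) : Prop := out = point_checker_alt s
instance (s : String) (out : Int) : Decidable (Spec_point_checker s out) := by unfold Spec_point_checker; infer_instance

-- ===== CLAIM (what is proved, stated in full; the proofs are below) =====
def Claim_equal_point_checker : Prop := ∀ (s : String), Dom_point_checker s → Spec_point_checker s (point_checker s)

-- ===== LEMMAS AND PROOFS =====

-- per-character points, as a function (proof helper)
def pcF (c : Char) : Int := if c = 'W' then 3 else if c = 'D' then 1 else 0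

theorem pcPoints_getD (c : Char) : pcPoints.getD c 0 = pcF c := by
  by_cases hw : c = 'W' <;> by_cases hd : c = 'D' <;>
    simp_all [pcPoints, pcF, PySem.Dict.ofList, PySem.Dict.update, PySem.Dict.getD_insert,
      PySem.Dict.getD_empty]

theorem pcGo_eq (s : String) (n lo hi : Nat) (hn : hi - lo ≤ n) (hhi : hi ≤ s.toList.length) :
    pcGo s lo hi = (((s.toList.drop lo).take (hi - lo)).map pcF).sum := by
  induction n generalizing lo hi with
  | zero =>
    have h0 : hi - lo = 0 := by omega
    unfold pcGo; simp [h0]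
  | succ n ih =>
    unfold pcGo
    by_cases h0 : hi - lo = 0
    · simp [h0]
    · by_cases h1 : hi - lo = 1
      · have hlo : lo < s.toList.length := by omega
        simp only [h1]
        norm_num
        rw [List.getElem?_eq_getElem hlo]
        have hlo2 : lo < (s.toList.map pcF).length := by simpa using hlo
        simp [pcPoints_getD, List.take_one, List.head?_drop, List.getElem?_eq_getElem hlo2]
      · have h2 : 2 ≤ hi - lo := by omega
        obtain ⟨mid, hmid⟩ : ∃ m : Nat, m = (lo + hi) / 2 := ⟨_, rfl⟩
        have hm1 : lo < mid := by omega
        have hm2 : mid < hi := by omega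
        simp only [h0, h1, if_false]
        rw [← hmid]
        have hq1 : mid - lo ≤ n := by omega
        have hq2 : mid ≤ s.toList.length := by omega
        have hq3 : hi - mid ≤ n := by omega
        rw [ih lo mid hq1 hq2, ih mid hi hq3 hhi]
        have hsplit : (s.toList.drop lo).take (hi - lo)
            = (s.toList.drop lo).take (mid - lo)
              ++ (s.toList.drop mid).take (hi - mid) := by
          have he : hi - lo = (mid - lo) + (hi - mid) := by omega
          have hd : lo + (mid - lo) = mid := by omega
          rw [he, List.take_add, List.drop_drop, hd]
        rw [hsplit]
        simp

theorem foldl_points (l : List Char) (a : Int) :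
    l.foldl (fun pnt i =>
      if i == 'W' then pnt + 3
      else if i == 'D' then pnt + 1
      else pnt) a
    = a + (l.map pcF).sum := by
  induction l generalizing a with
  | nil => simp
  | cons x t ih =>
    rw [List.foldl_cons, ih]
    by_cases hw : x = 'W'
    · subst hw; simp [pcF]; ring
    · by_cases hd : x = 'D'
      · subst hd; simp [pcF, hw]; ring
      · simp [pcF, hw, hd]

-- ===== VERDICT (by name: the statement is the Claim_ definition above) =====
theorem point_checker_spec : Claim_equal_point_checker := by
  intro s _
  unfold Spec_point_checker point_checker point_checker_alt
  rw [foldl_points, pcGo_eq s s.toList.length 0 s.length (by simp) (by simp)]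
  have ht : s.toList.take s.length = s.toList := List.take_of_length_le (by simp)
  simp only [Nat.sub_zero, List.drop_zero, ht]
  simp
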